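-- pv_equiv track=rewrite | github.com/yuzehui1996/illegal-parking | scripts/track_txt_check_same_id.py | split_frames
-- ===== SOURCE A (Python) =====
-- def split_frames(frame_list):
--     start = 0
--     ans = []
--     for i in range(1, len(frame_list)):
--         if abs(frame_list[i] - frame_list[i-1]) >= 10: #帧相隔跨度很大，可能是追踪错误
--             ans.append(frame_list[start:i])
--             start = i
--
--     ans.append(frame_list[start:])
--
--     return ans
-- ===== SOURCE B (Python) =====
-- def split_frames(frame_list):
--     # Builds the segmentation back-to-front: walk the list from the end,
--     # collecting segments in reversed order, then reverse everything once.
--     if not frame_list: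
--         return [frame_list]
--     segs = [[frame_list[-1]]]
--     for i in range(len(frame_list) - 2, -1, -1):
--         x = frame_list[i]
--         if abs(frame_list[i + 1] - x) >= 10:
--             segs.append([x])
--         else:
--             segs[-1].append(x)
--     for s in segs:
--         s.reverse()
--     segs.reverse()
--     return segs
-- ===== Notes on version B (the rewrite author's own statement) =====
-- stated objective: alternative
-- what changed: A scans forward carrying a start index and slices each segment out of the list when the next break is found; B walks the list backwards from the end, growing the current segment (or opening a new one) at its front in reversed form, and recovers the answer with one final reversal of every segment and of the segment list.
import Mathlib
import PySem

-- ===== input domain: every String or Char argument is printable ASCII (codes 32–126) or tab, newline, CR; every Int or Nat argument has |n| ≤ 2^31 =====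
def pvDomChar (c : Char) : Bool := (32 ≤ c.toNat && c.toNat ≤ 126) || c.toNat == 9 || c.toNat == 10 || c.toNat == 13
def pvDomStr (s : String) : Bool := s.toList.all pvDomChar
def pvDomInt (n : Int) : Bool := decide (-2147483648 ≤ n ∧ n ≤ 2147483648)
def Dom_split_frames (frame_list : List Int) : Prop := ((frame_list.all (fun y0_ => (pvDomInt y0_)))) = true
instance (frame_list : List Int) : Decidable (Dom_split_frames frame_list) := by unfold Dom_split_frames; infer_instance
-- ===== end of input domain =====

-- B replaces A's iterative index loop (start index + forward slicing) by a structural recursion that splits the tail first and builds the answer back-to-front (alternative decomposition, same cost).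


-- ===== PORT A =====
-- the gap test abs(frame_list[i] - frame_list[i-1]) >= 10; indices are always in range, so pyGetD with default 0 is exact
def pvGap (frame_list : List Int) (i : Int) : Bool :=
  10 ≤ |PySem.List.pyGetD frame_list i 0 - PySem.List.pyGetD frame_list (i - 1) 0|

def split_frames (frame_list : List Int) : List (List Int) :=
  let st := (PySem.List.pyRange 1 (frame_list.length : Int) 1).foldl
    (fun (st : Int × List (List Int)) i =>
      if pvGap frame_list i then
        (i, st.2 ++ [PySem.List.slice frame_list (some st.1) (some i)])
      else st)
    (0, [])
  st.2 ++ [PySem.List.slice frame_list (some st.1) none]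

-- ===== PORT B =====
-- backward loop of Source B: segs starts from the last element, grows reversed segments,
-- and the two final reversals are the two reverse() passes of Source B
def split_frames_alt (frame_list : List Int) : List (List Int) :=
  if frame_list = [] then [frame_list]
  else
    let segs := (PySem.List.pyRange ((frame_list.length : Int) - 2) (-1) (-1)).foldl
      (fun (segs : List (List Int)) i =>
        let x := PySem.List.pyGetD frame_list i 0
        if 10 ≤ |PySem.List.pyGetD frame_list (i + 1) 0 - x| then
          segs ++ [[x]]
        else
          segs.dropLast ++ [segs.getLastD [] ++ [x]])
      [[PySem.List.pyGetD frame_list (-1) 0]]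
    (segs.map List.reverse).reverse

-- ===== PRECONDITION & SPEC =====
def Spec_split_frames (frame_list : List Int) (out : List (List Int)) : Prop := out = split_frames_alt frame_list
instance (frame_list : List Int) (out : List (List Int)) : Decidable (Spec_split_frames frame_list out) := by unfold Spec_split_frames; infer_instance

-- ===== CLAIM (what is proved, stated in full; the proofs are below) =====
def Claim_equal_split_frames : Prop := ∀ (frame_list : List Int), Dom_split_frames frame_list → Spec_split_frames frame_list (split_frames frame_list)

-- ===== LEMMAS AND PROOFS =====

-- the back-to-front construction as a structural recursion (proof-side bridge between
-- A's slicing loop and B's backward loop)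
def pvRec : List Int → List (List Int)
  | [] => [[]]
  | [x] => [[x]]
  | x :: y :: rest =>
    let r := pvRec (y :: rest)
    if 10 ≤ |y - x| then [x] :: r
    else (x :: r.headD []) :: r.tail

-- the slices of fl between adjacent bounds 0, breaks…, n — the common form both ports are reduced to
def pvSegs (fl : List Int) : List (List Int) :=
  List.zipWith (fun a b => PySem.List.slice fl (some a) (some b))
    (0 :: (((PySem.List.pyRange 1 (fl.length : Int) 1).filter (fun i => pvGap fl i))
      ++ [(fl.length : Int)]))
    (((PySem.List.pyRange 1 (fl.length : Int) 1).filter (fun i => pvGap fl i))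
      ++ [(fl.length : Int)])

-- A's loop, characterised: folding over any index list r from state (s, acc) ends with
-- start = last break (or s), and acc extended by the slices between adjacent breaks.
theorem pv_fold_char (fl : List Int) (r : List Int) (s : Int) (acc : List (List Int)) :
    r.foldl
      (fun (st : Int × List (List Int)) i =>
        if pvGap fl i then
          (i, st.2 ++ [PySem.List.slice fl (some st.1) (some i)])
        else st)
      (s, acc)
    = ((r.filter (fun i => pvGap fl i)).getLastD s,
       acc ++ List.zipWith (fun a b => PySem.List.slice fl (some a) (some b))
               (s :: r.filter (fun i => pvGap fl i)) (r.filter (fun i => pvGap fl i))) := by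
  induction r generalizing s acc with
  | nil => simp
  | cons i r ih =>
    by_cases h : pvGap fl i
    · rw [List.foldl_cons, if_pos h, ih, List.filter_cons_of_pos h, List.getLastD_cons,
        List.zipWith_cons_cons, List.append_cons]
      simp
    · rw [List.foldl_cons, if_neg h, ih, List.filter_cons_of_neg (by simpa using h)]

-- zipWith over a bounds list with the final bound appended splits off the last slice
theorem pv_zip_snoc (fl : List Int) (fr : List Int) (s n : Int) :
    List.zipWith (fun a b => PySem.List.slice fl (some a) (some b)) (s :: (fr ++ [n])) (fr ++ [n])
    = List.zipWith (fun a b => PySem.List.slice fl (some a) (some b)) (s :: fr) fr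
      ++ [PySem.List.slice fl (some (fr.getLastD s)) (some n)] := by
  induction fr generalizing s with
  | nil => simp
  | cons a fr ih =>
    simp only [List.cons_append, List.zipWith_cons_cons, List.getLastD_cons, ih]

-- the trailing open slice fl[start:] equals fl[start:n] when 0 ≤ start
theorem pv_slice_open (fl : List Int) (s : Int) (hs : 0 ≤ s) :
    PySem.List.slice fl (some s) none = PySem.List.slice fl (some s) (some (fl.length : Int)) := by
  rw [PySem.List.slice_from fl hs, PySem.List.slice_toNat fl hs (by positivity)]
  exact (List.take_of_length_le (by simp)).symm

-- A's result equals the bounds/slices form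
theorem pv_A_eq_segs (fl : List Int) : split_frames fl = pvSegs fl := by
  unfold split_frames pvSegs
  simp only [pv_fold_char]
  set fr := (PySem.List.pyRange 1 (fl.length : Int) 1).filter (fun i => pvGap fl i) with hfr
  have hlast : 0 ≤ fr.getLastD 0 := by
    rcases h : fr.getLast? with _ | x
    · simp [List.getLastD_eq_getLast?, h]
    · have hx : x ∈ fr := List.mem_of_getLast? h
      have : x ∈ PySem.List.pyRange 1 (fl.length : Int) 1 := List.mem_of_mem_filter hx
      rw [PySem.List.mem_pyRange_one] at this
      simp [List.getLastD_eq_getLast?, h]; omega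
  rw [pv_slice_open fl _ hlast]
  simp [pv_zip_snoc]

-- index shift: looking up x::t at i+1 is looking up t at i, for 0 ≤ i (out of range: both default)
theorem pv_pyGetD_shift (x : Int) (t : List Int) (i : Int) (hi : 0 ≤ i) :
    PySem.List.pyGetD (x :: t) (i + 1) 0 = PySem.List.pyGetD t i 0 := by
  have h1 : i = ((i.toNat : Nat) : Int) := by omega
  have h2 : i + 1 = (((i.toNat + 1 : Nat)) : Int) := by omega
  rw [h2, h1, PySem.List.pyGetD_natCast, PySem.List.pyGetD_natCast, List.getD_cons_succ]
  simp [List.getD_eq_getElem?_getD]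
  rw [show (max i 0).toNat = i.toNat by omega]

-- gap shift: the gap test of x::t at i+1 is the gap test of t at i, for 1 ≤ i
theorem pv_gap_shift (x : Int) (t : List Int) (i : Int) (hi : 1 ≤ i) :
    pvGap (x :: t) (i + 1) = pvGap t i := by
  unfold pvGap
  have h1 : i + 1 - 1 = (i - 1) + 1 := by omega
  rw [pv_pyGetD_shift x t i (by omega), h1, pv_pyGetD_shift x t (i - 1) (by omega)]

-- the gap test of x::y::rest at index 1 is |y - x| >= 10
theorem pv_gap_one (x y : Int) (rest : List Int) :
    pvGap (x :: y :: rest) 1 = decide (10 ≤ |y - x|) := by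
  have ha : PySem.List.pyGetD (x :: y :: rest) 1 0 = y := by
    rw [show (1 : Int) = ((1 : Nat) : Int) by norm_num, PySem.List.pyGetD_natCast]; rfl
  have hb : PySem.List.pyGetD (x :: y :: rest) (1 - 1) 0 = x := by
    rw [show (1 : Int) - 1 = ((0 : Nat) : Int) by norm_num, PySem.List.pyGetD_natCast]; rfl
  unfold pvGap
  rw [ha, hb]

-- slice shift: a slice of x::t with both bounds shifted by one is the slice of t
theorem pv_slice_shift (x : Int) (t : List Int) (a b : Int) (ha : 0 ≤ a) (hb : 0 ≤ b) :
    PySem.List.slice (x :: t) (some (a + 1)) (some (b + 1))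
    = PySem.List.slice t (some a) (some b) := by
  rw [PySem.List.slice_toNat _ (by omega) (by omega), PySem.List.slice_toNat t ha hb]
  have h1 : (a + 1).toNat = a.toNat + 1 := by omega
  have h2 : (b + 1).toNat = b.toNat + 1 := by omega
  rw [h1, h2, List.drop_succ_cons]
  congr 1
  omega

-- head slice: a slice of x::t from 0 prepends x to the slice of t, for 0 ≤ b
theorem pv_slice_head (x : Int) (t : List Int) (b : Int) (hb : 0 ≤ b) :
    PySem.List.slice (x :: t) (some 0) (some (b + 1))
    = x :: PySem.List.slice t (some 0) (some b) := by
  rw [PySem.List.slice_toNat _ (by omega) (by omega), PySem.List.slice_toNat t (by omega) hb]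
  have h2 : (b + 1).toNat = b.toNat + 1 := by omega
  simp [h2]

-- the first slice of a singleton bound: (x::t)[0:1] = [x]
theorem pv_slice_01 (x : Int) (t : List Int) :
    PySem.List.slice (x :: t) (some 0) (some 1) = [x] := by
  rw [PySem.List.slice_toNat _ (by omega) (by omega)]
  rfl

-- zipping shifted bounds over x::t is zipping the bounds over t
theorem pv_zip_shift (x : Int) (t : List Int) (l1 l2 : List Int)
    (h1 : ∀ a ∈ l1, 0 ≤ a) (h2 : ∀ b ∈ l2, 0 ≤ b) :
    List.zipWith (fun a b => PySem.List.slice (x :: t) (some a) (some b))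
      (l1.map (· + 1)) (l2.map (· + 1))
    = List.zipWith (fun a b => PySem.List.slice t (some a) (some b)) l1 l2 := by
  induction l1 generalizing l2 with
  | nil => simp
  | cons a l1 ih =>
    cases l2 with
    | nil => simp
    | cons b l2 =>
      simp only [List.map_cons, List.zipWith_cons_cons]
      rw [pv_slice_shift x t a b (h1 a (by simp)) (h2 b (by simp)),
        ih l2 (fun u hu => h1 u (List.mem_cons_of_mem _ hu))
          (fun u hu => h2 u (List.mem_cons_of_mem _ hu))]

-- range shift: range(2, n) is range(1, n-1) shifted by one
theorem pv_range_shift (n : Int) :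
    PySem.List.pyRange 2 n 1 = (PySem.List.pyRange 1 (n - 1) 1).map (· + 1) := by
  rw [PySem.List.pyRange_one, PySem.List.pyRange_one, List.map_map]
  have h : (n - 2).toNat = (n - 1 - 1).toNat := by omega
  rw [h]
  apply List.map_congr_left
  intro k _
  simp; omega

-- the bounds/slices form satisfies B's recursion
theorem pv_segs_eq_rec (fl : List Int) : pvSegs fl = pvRec fl := by
  induction fl with
  | nil => decide
  | cons x t ih =>
    cases t with
    | nil =>
      unfold pvSegs
      rw [show ((([x] : List Int)).length : Int) = 1 by simp,
        PySem.List.pyRange_one_eq_nil (by omega)]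
      simp only [List.filter_nil, List.nil_append, List.zipWith_cons_cons,
        List.zipWith_nil_right]
      rw [pv_slice_01]
      rfl
    | cons y rest =>
      have hlen : ((x :: y :: rest).length : Int) = ((y :: rest).length : Int) + 1 := by simp
      set n' : Int := ((y :: rest).length : Int) with hn'
      have hn'pos : 1 ≤ n' := by simp [hn']
      -- break indices of the tail, all ≥ 1
      set fr' := (PySem.List.pyRange 1 n' 1).filter (fun i => pvGap (y :: rest) i) with hfr'
      have hfr'pos : ∀ a ∈ fr', 1 ≤ a := by
        intro a ha
        have := List.mem_of_mem_filter ha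
        rw [PySem.List.mem_pyRange_one] at this
        omega
      have hbpos : ∀ a ∈ fr' ++ [n'], 0 ≤ a := by
        intro a ha
        rcases List.mem_append.mp ha with h | h
        · exact le_trans (by omega) (hfr'pos a h)
        · simp at h; omega
      -- the shifted tail of the break indices of x::y::rest
      have htail : (PySem.List.pyRange (1 + 1) (n' + 1) 1).filter
          (fun i => pvGap (x :: y :: rest) i) = fr'.map (· + 1) := by
        rw [show (1 : Int) + 1 = 2 by norm_num, pv_range_shift (n' + 1),
          show n' + 1 - 1 = n' by ring, List.filter_map, hfr']
        congr 1
        apply List.filter_congr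
        intro i hi
        rw [PySem.List.mem_pyRange_one] at hi
        simp only [Function.comp]
        rw [pv_gap_shift x (y :: rest) i (by omega)]
      -- the break indices of x::y::rest: possibly 1, then the tail's breaks shifted
      have hfr : (PySem.List.pyRange 1 (n' + 1) 1).filter
          (fun i => pvGap (x :: y :: rest) i)
          = (if pvGap (x :: y :: rest) 1 then [1] else []) ++ fr'.map (· + 1) := by
        rw [PySem.List.pyRange_one_cons (by omega), List.filter_cons, htail]
        split_ifs <;> simp
      have hsegs' : pvSegs (y :: rest)
          = List.zipWith (fun a b => PySem.List.slice (y :: rest) (some a) (some b))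
              (0 :: (fr' ++ [n'])) (fr' ++ [n']) := by
        unfold pvSegs
        rw [← hn', ← hfr']
      unfold pvSegs
      rw [hlen, hfr, pv_gap_one]
      by_cases hg : 10 ≤ |y - x|
      · -- large gap: [x] becomes its own segment, the tail's segments are shifted
        rw [if_pos (by simpa using hg)]
        have hshape : (((1 : Int) :: fr'.map (· + 1)) ++ [n' + 1])
            = ((0 : Int) + 1) :: ((fr' ++ [n']).map (· + 1)) := by simp
        simp only [List.cons_append, List.nil_append] at hshape ⊢
        rw [hshape, List.zipWith_cons_cons]
        have hmap : ((0 : Int) + 1) :: (fr' ++ [n']).map (· + 1)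
            = (((0 : Int) :: (fr' ++ [n'])).map (· + 1)) := by simp
        rw [hmap, pv_zip_shift x (y :: rest) _ _
          (by intro a ha; rcases List.mem_cons.mp ha with h | h
              · omega
              · exact hbpos a h)
          hbpos, ← hsegs', ih]
        rw [show (0 : Int) + 1 = 1 by ring, pv_slice_01]
        show _ = pvRec (x :: y :: rest)
        simp only [pvRec]
        rw [if_pos (by simpa using hg)]
      · -- small gap: x is prepended to the tail's first segment
        rw [if_neg (by simpa using hg)]
        rcases hcs : fr' ++ [n'] with _ | ⟨c, cs⟩
        · exact absurd hcs (by simp)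
        have hc0 : 0 ≤ c := hbpos c (by rw [hcs]; simp)
        have hcs0 : ∀ b ∈ cs, 0 ≤ b := fun b hb => hbpos b (by rw [hcs]; simp [hb])
        have hL : (fr'.map (· + 1)) ++ [n' + 1] = (c + 1) :: cs.map (· + 1) := by
          have h := congrArg (List.map (· + 1)) hcs
          simpa using h
        simp only [List.nil_append] at hL ⊢
        rw [hL, List.zipWith_cons_cons]
        have hmap : (c + 1) :: cs.map (· + 1) = ((c :: cs).map (· + 1)) := by simp
        rw [hmap, pv_zip_shift x (y :: rest) (c :: cs) cs
          (by intro a ha; rcases List.mem_cons.mp ha with h | h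
              · omega
              · exact hcs0 a h)
          hcs0]
        rw [pv_slice_head x (y :: rest) c hc0]
        show _ = pvRec (x :: y :: rest)
        simp only [pvRec]
        rw [if_neg (by simpa using hg), ← ih, hsegs', hcs, List.zipWith_cons_cons]
        simp

-- reversed encoding of a segment list: segments in reverse order, each reversed
def pvEnc (l : List (List Int)) : List (List Int) := l.reverse.map List.reverse

-- the recursion never returns an empty segment list
theorem pv_rec_ne_nil (fl : List Int) : pvRec fl ≠ [] := by
  cases fl with
  | nil => simp [pvRec]
  | cons x t =>
    cases t with
    | nil => simp [pvRec]
    | cons y rest =>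
      simp only [pvRec]
      split_ifs <;> simp

-- range shift: range(1, m) is range(0, m-1) shifted by one
theorem pv_range_shift1 (m : Int) :
    PySem.List.pyRange 1 m 1 = (PySem.List.pyRange 0 (m - 1) 1).map (· + 1) := by
  rw [PySem.List.pyRange_one, PySem.List.pyRange_one, List.map_map]
  rw [show (m - 1).toNat = (m - 1 - 0).toNat by norm_num]
  apply List.map_congr_left
  intro k _
  simp
  omega

-- B's backward loop over a nonempty list computes the reversed encoding of the recursion
theorem pv_loop (fl : List Int) (hne : fl ≠ []) :
    (PySem.List.pyRange ((fl.length : Int) - 2) (-1) (-1)).foldl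
      (fun (segs : List (List Int)) i =>
        let x := PySem.List.pyGetD fl i 0
        if 10 ≤ |PySem.List.pyGetD fl (i + 1) 0 - x| then
          segs ++ [[x]]
        else
          segs.dropLast ++ [segs.getLastD [] ++ [x]])
      [[PySem.List.pyGetD fl (-1) 0]]
    = pvEnc (pvRec fl) := by
  induction fl with
  | nil => exact absurd rfl hne
  | cons x t ih =>
    cases t with
    | nil =>
      rw [show (([x] : List Int).length : Int) - 2 = -1 by simp,
        PySem.List.pyRange_neg_one_eq_nil (by omega), List.foldl_nil]
      simp [pvEnc, pvRec, PySem.List.pyGetD, PySem.List.pyGet?, PySem.List.pyIdx?]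
    | cons y rest =>
      -- turn the countdown loop into a foldr over the ascending range
      rw [PySem.List.pyRange_neg_one_eq_reverse, List.foldl_reverse,
        show (-1 : Int) + 1 = 0 by norm_num,
        show ((x :: y :: rest).length : Int) - 2 + 1 = ((rest.length : Int) + 1) by push_cast [List.length_cons]; ring,
        PySem.List.pyRange_one_cons (by omega), List.foldr_cons,
        show (0 : Int) + 1 = 1 by norm_num,
        pv_range_shift1 ((rest.length : Int) + 1),
        show (rest.length : Int) + 1 - 1 = (rest.length : Int) by ring, List.foldr_map]
      -- the shifted inner fold is the tail's loop
      have hinner :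
          (PySem.List.pyRange 0 (rest.length : Int) 1).foldr
            (fun i (segs : List (List Int)) =>
              (fun (segs : List (List Int)) i =>
                let xv := PySem.List.pyGetD (x :: y :: rest) i 0
                if 10 ≤ |PySem.List.pyGetD (x :: y :: rest) (i + 1) 0 - xv| then
                  segs ++ [[xv]]
                else
                  segs.dropLast ++ [segs.getLastD [] ++ [xv]]) segs (i + 1))
            [[PySem.List.pyGetD (x :: y :: rest) (-1) 0]]
          = pvEnc (pvRec (y :: rest)) := by
        have hinit : PySem.List.pyGetD (x :: y :: rest) (-1) 0
            = PySem.List.pyGetD (y :: rest) (-1) 0 := by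
          simp [pysem]
        rw [hinit, List.foldr_ext _ (fun i (segs : List (List Int)) =>
              let xv := PySem.List.pyGetD (y :: rest) i 0
              if 10 ≤ |PySem.List.pyGetD (y :: rest) (i + 1) 0 - xv| then
                segs ++ [[xv]]
              else
                segs.dropLast ++ [segs.getLastD [] ++ [xv]]) _
          (by
            intro i hi segs
            rw [PySem.List.mem_pyRange_one] at hi
            simp only
            rw [pv_pyGetD_shift x (y :: rest) i (by omega),
              pv_pyGetD_shift x (y :: rest) (i + 1) (by omega)])]
        have h := ih (by simp)
        rw [PySem.List.pyRange_neg_one_eq_reverse, List.foldl_reverse,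
          show (-1 : Int) + 1 = 0 by norm_num,
          show ((y :: rest).length : Int) - 2 + 1 = (rest.length : Int) by push_cast [List.length_cons]; ring] at h
        exact h
      rw [hinner]
      -- apply the loop body at index 0: the head is folded in last
      have hx0 : PySem.List.pyGetD (x :: y :: rest) 0 0 = x := by
        rw [show (0 : Int) = ((0 : Nat) : Int) by norm_num, PySem.List.pyGetD_natCast]; rfl
      have hy0 : PySem.List.pyGetD (x :: y :: rest) 1 0 = y := by
        rw [show (1 : Int) = ((1 : Nat) : Int) by norm_num, PySem.List.pyGetD_natCast]; rfl
      simp only [hx0, hy0]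
      rcases hr : pvRec (y :: rest) with _ | ⟨h, tl⟩
      · exact absurd hr (pv_rec_ne_nil (y :: rest))
      by_cases hg : 10 ≤ |y - x|
      · rw [if_pos hg]
        simp only [pvRec, if_pos hg, hr]
        simp [pvEnc]
      · rw [if_neg hg]
        simp only [pvRec, if_neg hg, hr]
        simp only [pvEnc, List.reverse_cons, List.map_append, List.map_cons, List.map_nil,
          List.dropLast_concat, List.getLastD_concat, List.headD_cons, List.tail_cons]

-- B's port equals the recursion
theorem pv_alt_eq_rec (fl : List Int) : split_frames_alt fl = pvRec fl := by
  unfold split_frames_alt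
  by_cases h : fl = []
  · rw [if_pos h, h]; rfl
  · rw [if_neg h]
    simp only [pv_loop fl h]
    unfold pvEnc
    rw [List.map_map]
    have : List.reverse ∘ List.reverse = (id : List Int → List Int) := by
      funext l; simp
    rw [this, List.map_id, List.reverse_reverse]

-- ===== VERDICT (by name: the statement is the Claim_ definition above) =====
theorem split_frames_spec : Claim_equal_split_frames := by
  intro fl _
  unfold Spec_split_frames
  rw [pv_A_eq_segs, pv_segs_eq_rec, ← pv_alt_eq_rec]
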